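-- pv_equiv track=rewrite | github.com/mrcamo13/CyberForge | aegis/utils/tools.py | compliance_mapper
-- ===== SOURCE A (Python) =====
-- def compliance_mapper(challenge_text: str) -> str:
--     """Map controls to NIST CSF functions; compute gap percentage per function.
--
--     Input: newline-separated lines: control_id|nist_function|implemented
--     """
--     lines = [l for l in challenge_text.split("\n") if l.strip()]
--
--     # Build per-function counts
--     func_counts: dict = {}
--     for line in lines:
--         parts = line.split("|")
--         if len(parts) < 3:
--             continue
--         func = parts[1].strip().upper()
--         impl = parts[2].strip().lower()
--         if func not in func_counts:
--             func_counts[func] = {"yes": 0, "total": 0}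
--         func_counts[func]["total"] += 1
--         if impl == "yes":
--             func_counts[func]["yes"] += 1
--
--     total_controls = sum(v["total"] for v in func_counts.values())
--
--     # Compute pct and label per function
--     results = []
--     for func, counts in func_counts.items():
--         pct = round((counts["yes"] / counts["total"]) * 100) if counts["total"] > 0 else 0
--         if pct == 100:
--             label = "[MET]"
--         elif pct >= 75:
--             label = "[MINOR GAP]"
--         elif pct >= 50:
--             label = "[MODERATE GAP]"
--         else:
--             label = "[CRITICAL GAP]"
--         results.append({"func": func, "yes": counts["yes"], "total": counts["total"],
--                         "pct": pct, "label": label})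
--
--     # Sort by pct ascending, then alphabetically for ties
--     results.sort(key=lambda r: (r["pct"], r["func"]))
--
--     output = "COMPLIANCE MAPPER -- NIST CSF gap analysis\n\n"
--     output += f"Controls analyzed: {total_controls}\n\n"
--     output += "NIST CSF compliance by function (largest gap first):\n\n"
--
--     for r in results:
--         output += (f"{r['label']:<16} {r['func']:<9} "
--                    f"{r['yes']:>2}/{r['total']:>2} controls implemented ({r['pct']}%)\n")
--
--     if results:
--         top_gap = results[0]
--         output += f"\nTop priority gap: {top_gap['func']} ({top_gap['pct']}%)\n"
--         output += "Recommended action: Develop recovery plans, document BCP, test annually."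
--
--     return output
-- ===== SOURCE B (Python) =====
-- def compliance_mapper(challenge_text: str) -> str:
--     """Map controls to NIST CSF functions; compute gap percentage per function.
--
--     Two-pass decomposition: parse once into (func, impl) pairs, then for each
--     distinct function (first-occurrence order) count its entries directly.
--     """
--     parsed = []
--     for line in challenge_text.split("\n"):
--         if line.strip():
--             parts = line.split("|")
--             if len(parts) >= 3:
--                 parsed.append((parts[1].strip().upper(), parts[2].strip().lower()))
--
--     funcs = list(dict.fromkeys(f for f, _ in parsed))
--
--     results = []
--     for func in funcs:
--         total = sum(1 for f, _ in parsed if f == func)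
--         yes = sum(1 for f, i in parsed if f == func and i == "yes")
--         pct = round(yes / total * 100)
--         if pct == 100:
--             label = "[MET]"
--         elif pct >= 75:
--             label = "[MINOR GAP]"
--         elif pct >= 50:
--             label = "[MODERATE GAP]"
--         else:
--             label = "[CRITICAL GAP]"
--         results.append((func, yes, total, pct, label))
--
--     results.sort(key=lambda r: (r[3], r[0]))
--
--     output = "COMPLIANCE MAPPER -- NIST CSF gap analysis\n\n"
--     output += f"Controls analyzed: {len(parsed)}\n\n"
--     output += "NIST CSF compliance by function (largest gap first):\n\n"
--
--     output += "".join(f"{label:<16} {func:<9} {yes:>2}/{total:>2} controls implemented ({pct}%)\n"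
--                       for func, yes, total, pct, label in results)
--
--     if results:
--         func, _, _, pct, _ = results[0]
--         output += f"\nTop priority gap: {func} ({pct}%)\n"
--         output += "Recommended action: Develop recovery plans, document BCP, test annually."
--
--     return output
-- ===== Notes on version B (the rewrite author's own statement) =====
-- stated objective: alternative
-- what changed: Replaces the incremental dict-of-counters aggregation with a two-pass decomposition: parse all lines once into (func, impl) pairs, dedup the function names in first-occurrence order, then count total/yes per function by direct scans over the parsed list.
import Mathlib
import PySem

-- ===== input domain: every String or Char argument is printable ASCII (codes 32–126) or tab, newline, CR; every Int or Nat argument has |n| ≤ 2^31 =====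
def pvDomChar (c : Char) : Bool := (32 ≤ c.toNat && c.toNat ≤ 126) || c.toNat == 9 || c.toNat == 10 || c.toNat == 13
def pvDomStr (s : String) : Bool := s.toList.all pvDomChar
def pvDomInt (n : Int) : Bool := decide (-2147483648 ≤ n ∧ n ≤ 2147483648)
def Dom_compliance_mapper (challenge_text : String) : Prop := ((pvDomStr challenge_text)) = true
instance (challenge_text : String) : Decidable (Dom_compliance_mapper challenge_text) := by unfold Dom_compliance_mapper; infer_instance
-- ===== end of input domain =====

-- B replaces A's incremental dict-of-counters aggregation by a two-pass decomposition
-- (parse once into (func, impl) pairs, dedup function names, count per function by direct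
-- scans); same output proved for every input.


-- ===== PORT A =====

-- round-half-even of n/d (d > 0); ties are exact, so this is IEEE round-to-nearest-even
-- at the cut d when d is a power of two, and Python's round() tie rule on exact halves.
def pvRheDiv (n d : Nat) : Nat :=
  let q := n / d
  let r := n % d
  if 2 * r < d then q
  else if d < 2 * r then q + 1
  else if q % 2 = 0 then q else q + 1

-- Exact integer model of Python's round(y/t * 100) (y, t non-negative ints, t > 0):
-- models the two IEEE-754 double roundings (y/t, then *100) and the final
-- round-half-even to int, by tracking the 53-bit significand exactly.
-- (t = 0 or y = 0 returns 0; both programs only call it with 0 < t.)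
def pvRound100 (y t : Nat) : Int :=
  if y = 0 ∨ t = 0 then 0 else
  let bly := Nat.log2 y + 1
  let blt := Nat.log2 t + 1
  -- represent y/t as n/d · 2^(-s) with n/d near 2^52
  let nds : Nat × Nat × Int :=
    if bly ≤ 52 + blt then (y <<< (52 + blt - bly), t, ((52 + blt - bly : Nat) : Int))
    else (y, t <<< (bly - (52 + blt)), -((bly - (52 + blt) : Nat) : Int))
  let nds := if nds.1 / nds.2.1 < 2 ^ 52 then (2 * nds.1, nds.2.1, nds.2.2 + 1)
             else if 2 ^ 53 ≤ nds.1 / nds.2.1 then (nds.1, 2 * nds.2.1, nds.2.2 - 1)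
             else nds
  let m := pvRheDiv nds.1 nds.2.1
  let ms : Nat × Int := if m = 2 ^ 53 then (2 ^ 52, nds.2.2 - 1) else (m, nds.2.2)
  let n2 := ms.1 * 100
  let k := (Nat.log2 n2 + 1) - 53
  let m2 := pvRheDiv n2 (2 ^ k)
  let m2k : Nat × Nat := if m2 = 2 ^ 53 then (2 ^ 52, k + 1) else (m2, k)
  let e2 : Int := (m2k.2 : Int) - ms.2
  if 0 ≤ e2 then ((m2k.1 <<< e2.toNat : Nat) : Int) else ((pvRheDiv m2k.1 (2 ^ (-e2).toNat) : Nat) : Int)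

-- f"{s:<w}" (left-justify with spaces; exact for ASCII, where one char = one column)
def pvPadRight (s : String) (w : Int) : String :=
  s ++ String.ofList (List.replicate (w - PySem.Str.len s).toNat ' ')

-- f"{n:>w}" on an int (right-justify str(n) with spaces)
def pvPadLeftInt (n : Int) (w : Int) : String :=
  String.ofList (List.replicate (w - PySem.Str.len (PySem.Int.toStr n)).toNat ' ') ++ PySem.Int.toStr n

-- one report row: f"{label:<16} {func:<9} {yes:>2}/{total:>2} controls implemented ({pct}%)\n"
-- (identical f-string in A and B)
def pvRow (r : String × Int × Int × Int × String) : String :=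
  pvPadRight r.2.2.2.2 16 ++ " " ++ pvPadRight r.1 9 ++ " " ++
  pvPadLeftInt r.2.1 2 ++ "/" ++ pvPadLeftInt r.2.2.1 2 ++
  " controls implemented (" ++ PySem.Int.toStr r.2.2.2.1 ++ "%)\n"

-- A's loop body over one (non-blank) line; inner dict {"yes": …, "total": …} is the pair (yes, total)
def pvAggLine (d : PySem.Dict String (Int × Int)) (line : String) : PySem.Dict String (Int × Int) :=
  let parts := (PySem.Str.split? line "|").getD []   -- sep "|" ≠ "" so split? is always some
  if parts.length < 3 then d
  else
    let func := PySem.Str.upper (PySem.Str.strip (PySem.List.pyGetD parts 1 ""))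
    let impl := PySem.Str.lower (PySem.Str.strip (PySem.List.pyGetD parts 2 ""))
    let d1 := if d.contains func then d else d.insert func (0, 0)
    let c := d1.getD func (0, 0)
    let c := (c.1, c.2 + 1)                           -- func_counts[func]["total"] += 1
    let c := if impl == "yes" then (c.1 + 1, c.2) else c
    d1.insert func c

-- A's per-function result record {"func","yes","total","pct","label"} as a 5-tuple
def pvMkA (fc : String × (Int × Int)) : String × Int × Int × Int × String :=
  let pct : Int := if fc.2.2 > 0 then pvRound100 fc.2.1.toNat fc.2.2.toNat else 0
  let label := if pct == 100 then "[MET]"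
               else if pct ≥ 75 then "[MINOR GAP]"
               else if pct ≥ 50 then "[MODERATE GAP]"
               else "[CRITICAL GAP]"
  (fc.1, fc.2.1, fc.2.2, pct, label)

def compliance_mapper (challenge_text : String) : String :=
  let lines := ((PySem.Str.split? challenge_text "\n").getD []).filter
      (fun l => PySem.Str.strip l != "")              -- `if l.strip()`: truthiness = non-empty
  let func_counts := lines.foldl pvAggLine PySem.Dict.empty
  let total_controls : Int := (func_counts.values.map (fun v => v.2)).sum
  let results := func_counts.items.foldl (fun acc fc => acc ++ [pvMkA fc]) []
  let results := PySem.List.sorted2 results (fun r => r.2.2.2.1) (fun r => r.1)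
  let output := "COMPLIANCE MAPPER -- NIST CSF gap analysis\n\n"
  let output := output ++ "Controls analyzed: " ++ PySem.Int.toStr total_controls ++ "\n\n"
  let output := output ++ "NIST CSF compliance by function (largest gap first):\n\n"
  let output := results.foldl (fun out r => out ++ pvRow r) output
  match results with
  | [] => output
  | top :: _ =>
      output ++ "\nTop priority gap: " ++ top.1 ++ " (" ++ PySem.Int.toStr top.2.2.2.1 ++ "%)\n"
             ++ "Recommended action: Develop recovery plans, document BCP, test annually."

-- ===== PORT B =====

-- B's parser: one line → (func, impl), skipping blank and short lines
def pvParseB (line : String) : Option (String × String) :=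
  if PySem.Str.strip line != "" then
    let parts := (PySem.Str.split? line "|").getD []  -- sep "|" ≠ "" so split? is always some
    if 3 ≤ parts.length then
      some (PySem.Str.upper (PySem.Str.strip (PySem.List.pyGetD parts 1 "")),
            PySem.Str.lower (PySem.Str.strip (PySem.List.pyGetD parts 2 "")))
    else none
  else none

-- B's per-function result: count total and yes by direct scans over the parsed pairs
def pvMkB (parsed : List (String × String)) (func : String) : String × Int × Int × Int × String :=
  let total : Int := (parsed.countP (fun p => p.1 == func) : Nat)
  let yes : Int := (parsed.countP (fun p => p.1 == func && p.2 == "yes") : Nat)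
  let pct := pvRound100 yes.toNat total.toNat
  let label := if pct == 100 then "[MET]"
               else if pct ≥ 75 then "[MINOR GAP]"
               else if pct ≥ 50 then "[MODERATE GAP]"
               else "[CRITICAL GAP]"
  (func, yes, total, pct, label)

def compliance_mapper_alt (challenge_text : String) : String :=
  let parsed := ((PySem.Str.split? challenge_text "\n").getD []).filterMap pvParseB
  let funcs := PySem.List.dedup (parsed.map (fun p => p.1))   -- dict.fromkeys order
  let results := funcs.map (pvMkB parsed)
  let results := PySem.List.sorted2 results (fun r => r.2.2.2.1) (fun r => r.1)
  let output := "COMPLIANCE MAPPER -- NIST CSF gap analysis\n\n"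
  let output := output ++ "Controls analyzed: " ++ PySem.Int.toStr (parsed.length : Int) ++ "\n\n"
  let output := output ++ "NIST CSF compliance by function (largest gap first):\n\n"
  let output := output ++ String.join (results.map pvRow)     -- "".join(...)
  match results with
  | [] => output
  | top :: _ =>
      output ++ "\nTop priority gap: " ++ top.1 ++ " (" ++ PySem.Int.toStr top.2.2.2.1 ++ "%)\n"
             ++ "Recommended action: Develop recovery plans, document BCP, test annually."

-- ===== PRECONDITION & SPEC =====
def Spec_compliance_mapper (challenge_text : String) (out : String) : Prop := out = compliance_mapper_alt challenge_text
instance (challenge_text : String) (out : String) : Decidable (Spec_compliance_mapper challenge_text out) := by unfold Spec_compliance_mapper; infer_instance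

-- ===== CLAIM (what is proved, stated in full; the proofs are below) =====
def Claim_equal_compliance_mapper : Prop := ∀ (challenge_text : String), Dom_compliance_mapper challenge_text → Spec_compliance_mapper challenge_text (compliance_mapper challenge_text)

-- ===== LEMMAS AND PROOFS =====

-- A's dict-update step, after parsing (what pvAggLine does on a line that parses)
def pvStep (d : PySem.Dict String (Int × Int)) (p : String × String) : PySem.Dict String (Int × Int) :=
  let d1 := if d.contains p.1 then d else d.insert p.1 (0, 0)
  let c := d1.getD p.1 (0, 0)
  let c := (c.1, c.2 + 1)
  let c := if p.2 == "yes" then (c.1 + 1, c.2) else c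
  d1.insert p.1 c

def pvYes (ps : List (String × String)) (f : String) : Int :=
  (ps.countP (fun p => p.1 == f && p.2 == "yes") : Nat)

def pvTot (ps : List (String × String)) (f : String) : Int :=
  (ps.countP (fun p => p.1 == f) : Nat)

theorem pvDedupMem {xs : List String} {x : String} (h : x ∈ xs) :
    PySem.List.dedup (xs ++ [x]) = PySem.List.dedup xs := by
  simp only [PySem.List.dedup_eq_ofList, PySem.Set.ofList_eq_foldl, List.foldl_append, List.foldl]
  rw [← PySem.Set.ofList_eq_foldl]
  exact PySem.Set.add_of_mem (by rw [PySem.Set.mem_ofList]; exact h)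

theorem pvDedupNotMem {xs : List String} {x : String} (h : ¬ x ∈ xs) :
    PySem.List.dedup (xs ++ [x]) = PySem.List.dedup xs ++ [x] := by
  simp only [PySem.List.dedup_eq_ofList, PySem.Set.ofList_eq_foldl, List.foldl_append, List.foldl]
  rw [← PySem.Set.ofList_eq_foldl]
  exact PySem.Set.add_of_not_mem (by rw [PySem.Set.mem_ofList]; exact h)

-- A's filtered-lines fold is the fold of pvStep over B's parsed list
theorem pv_fold_lines_eq (ls : List String) (d : PySem.Dict String (Int × Int)) :
    (ls.filter (fun l => PySem.Str.strip l != "")).foldl pvAggLine d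
      = (ls.filterMap pvParseB).foldl pvStep d := by
  induction ls generalizing d with
  | nil => rfl
  | cons l t ih =>
    by_cases hb : PySem.Str.strip l != ""
    · by_cases hlen : ((PySem.Str.split? l "|").getD []).length < 3
      · have hp : pvParseB l = none := by
          unfold pvParseB; rw [if_pos hb, if_neg (by omega)]
        have ha : pvAggLine d l = d := by
          unfold pvAggLine; rw [if_pos hlen]
        simp [hb, hp, ha, ih]
      · have hp : pvParseB l = some (PySem.Str.upper (PySem.Str.strip (PySem.List.pyGetD ((PySem.Str.split? l "|").getD []) 1 "")),
            PySem.Str.lower (PySem.Str.strip (PySem.List.pyGetD ((PySem.Str.split? l "|").getD []) 2 ""))) := by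
          unfold pvParseB; rw [if_pos hb, if_pos (by omega)]
        have ha : pvAggLine d l = pvStep d (PySem.Str.upper (PySem.Str.strip (PySem.List.pyGetD ((PySem.Str.split? l "|").getD []) 1 "")),
            PySem.Str.lower (PySem.Str.strip (PySem.List.pyGetD ((PySem.Str.split? l "|").getD []) 2 ""))) := by
          unfold pvAggLine pvStep; rw [if_neg hlen]
        simp [hb, hp, ha, ih]
    · have hp : pvParseB l = none := by unfold pvParseB; rw [if_neg hb]
      simp [hb, hp, ih]

-- the dict invariant: items of the aggregation fold, keyed in first-occurrence order
theorem pv_items_fold (ps : List (String × String)) :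
    (ps.foldl pvStep PySem.Dict.empty).items
      = (PySem.List.dedup (ps.map Prod.fst)).map (fun f => (f, pvYes ps f, pvTot ps f)) := by
  induction ps using List.reverseRecOn with
  | nil => rfl
  | append_singleton ps p ih =>
    rw [List.foldl_append, List.foldl_cons, List.foldl_nil, List.map_append, List.map_cons, List.map_nil]
    set D := ps.foldl pvStep PySem.Dict.empty with hD
    have hkeys : D.keys = PySem.List.dedup (ps.map Prod.fst) := by
      show D.items.map Prod.fst = _
      rw [ih, List.map_map,
        show (Prod.fst ∘ fun f => (f, pvYes ps f, pvTot ps f)) = id from rfl, List.map_id]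
    have hnodup : D.keys.Nodup := by
      rw [hkeys, PySem.List.dedup_eq_ofList]; exact PySem.Set.nodup_ofList _
    have hyes_ne : ∀ f, f ≠ p.1 → pvYes (ps ++ [p]) f = pvYes ps f := by
      intro f hne
      unfold pvYes
      rw [List.countP_append]
      simp [Ne.symm hne]
    have htot_ne : ∀ f, f ≠ p.1 → pvTot (ps ++ [p]) f = pvTot ps f := by
      intro f hne
      unfold pvTot
      rw [List.countP_append]
      simp [Ne.symm hne]
    have hyes_eq : pvYes (ps ++ [p]) p.1 = pvYes ps p.1 + (if p.2 == "yes" then 1 else 0) := by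
      unfold pvYes
      rw [List.countP_append]
      by_cases hy : p.2 == "yes" <;> simp [hy]
    have htot_eq : pvTot (ps ++ [p]) p.1 = pvTot ps p.1 + 1 := by
      unfold pvTot
      rw [List.countP_append]
      simp
    by_cases hp : p.1 ∈ ps.map Prod.fst
    · have hcont : D.contains p.1 = true := by
        rw [PySem.Dict.contains_eq_decide_mem_keys, hkeys]
        simp only [decide_eq_true_eq]
        rw [PySem.List.mem_dedup]
        exact hp
      have hmemit : (p.1, pvYes ps p.1, pvTot ps p.1) ∈ D.items := by
        rw [ih]
        exact List.mem_map.mpr ⟨p.1, (PySem.List.mem_dedup _ _).mpr hp, rfl⟩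
      have hgetD : D.getD p.1 (0, 0) = (pvYes ps p.1, pvTot ps p.1) :=
        PySem.Dict.getD_of_mem_items D hmemit hnodup _
      rw [pvDedupMem hp]
      simp only [pvStep, hcont, if_pos, hgetD]
      rw [PySem.Dict.items_insert_of_contains D _ hcont, ih, List.map_map]
      apply List.map_congr_left
      intro f hfmem
      by_cases hfe : f = p.1
      · subst hfe
        simp only [Function.comp_apply, beq_self_eq_true, if_pos, hyes_eq, htot_eq]
        by_cases hy : (p.2 == "yes") = true
        · rw [if_pos hy, if_pos hy]
        · rw [if_neg hy, if_neg hy]; simp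
      · simp only [Function.comp_apply, hyes_ne f hfe, htot_ne f hfe]
        simp [hfe]
    · have hcont : D.contains p.1 = false := by
        rw [PySem.Dict.contains_eq_decide_mem_keys, hkeys]
        simp only [decide_eq_false_iff_not]
        rw [PySem.List.mem_dedup]
        exact hp
      have hzero_yes : pvYes ps p.1 = 0 := by
        unfold pvYes
        rw [List.countP_eq_zero.mpr]
        · rfl
        · intro q hq
          simp only [Bool.and_eq_true, beq_iff_eq, not_and]
          intro h1
          exact absurd (List.mem_map.mpr ⟨q, hq, h1⟩) hp
      have hzero_tot : pvTot ps p.1 = 0 := by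
        unfold pvTot
        rw [List.countP_eq_zero.mpr]
        · rfl
        · intro q hq
          simp only [beq_iff_eq]
          intro h1
          exact absurd (List.mem_map.mpr ⟨q, hq, h1⟩) hp
      rw [pvDedupNotMem hp, List.map_append, List.map_cons, List.map_nil]
      simp only [pvStep, hcont, Bool.false_eq_true, if_false]
      rw [PySem.Dict.getD_insert_self, PySem.Dict.insert_insert_self,
          PySem.Dict.items_insert_of_not_contains D _ hcont, ih]
      congr 1
      · apply List.map_congr_left
        intro f hfmem
        have hfe : f ≠ p.1 := by
          intro h; subst h
          exact hp ((PySem.List.mem_dedup _ _).mp hfmem)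
        simp [hyes_ne f hfe, htot_ne f hfe]
      · simp only [hyes_eq, htot_eq, hzero_yes, hzero_tot]
        by_cases hy : (p.2 == "yes") = true
        · rw [if_pos hy, if_pos hy]
        · rw [if_neg hy, if_neg hy]; simp

-- total_controls: the per-function totals sum to the number of parsed lines
theorem pv_sum_tot (ps : List (String × String)) :
    (((PySem.List.dedup (ps.map Prod.fst)).map (fun f => pvTot ps f)).sum) = (ps.length : Int) := by
  have hperm : (PySem.List.dedup (ps.map Prod.fst)).Perm (ps.map Prod.fst).dedup := by
    rw [List.perm_ext_iff_of_nodup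
      (by rw [PySem.List.dedup_eq_ofList]; exact PySem.Set.nodup_ofList _) (List.nodup_dedup _)]
    intro a
    rw [PySem.List.mem_dedup, List.mem_dedup]
  have h2 : ∀ f, pvTot ps f = ((ps.map Prod.fst).count f : Int) := by
    intro f
    unfold pvTot
    rw [List.count_eq_countP, List.countP_map]
    rfl
  calc ((PySem.List.dedup (ps.map Prod.fst)).map (fun f => pvTot ps f)).sum
      = (((ps.map Prod.fst).dedup).map (fun f => pvTot ps f)).sum := (hperm.map _).sum_eq
    _ = (ps.length : Int) := by
        simp only [h2]
        rw [show (List.map (fun f => (((ps.map Prod.fst).count f : Nat) : Int)) ((ps.map Prod.fst).dedup))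
              = List.map (fun n : Nat => (n : Int)) (List.map (fun x => (ps.map Prod.fst).count x) ((ps.map Prod.fst).dedup)) by
            rw [List.map_map]; rfl]
        rw [← Nat.cast_list_sum, List.sum_map_count_dedup_eq_length]
        simp

-- pointwise: A's record from the dict entry equals B's recomputed record
theorem pv_mk_eq (ps : List (String × String)) (f : String)
    (hf : f ∈ PySem.List.dedup (ps.map Prod.fst)) :
    pvMkA (f, pvYes ps f, pvTot ps f) = pvMkB ps f := by
  have hmem : f ∈ ps.map Prod.fst := (PySem.List.mem_dedup _ _).mp hf
  have hpos : 0 < ps.countP (fun p => p.1 == f) := by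
    rw [List.countP_pos_iff]
    obtain ⟨p, hp, hfst⟩ := List.mem_map.mp hmem
    exact ⟨p, hp, by simp [hfst]⟩
  unfold pvMkA pvMkB pvYes pvTot
  have : ((ps.countP (fun p => p.1 == f) : Nat) : Int) > 0 := by exact_mod_cast hpos
  simp only [if_pos this]

-- building a string with repeated += equals prefix ++ join
theorem pvFoldlAppend (l : List String) (init : String) :
    l.foldl (· ++ ·) init = init ++ l.foldl (· ++ ·) "" := by
  induction l generalizing init with
  | nil => simp
  | cons a t ih =>
    rw [List.foldl_cons, List.foldl_cons, ih (init ++ a), ih ("" ++ a), String.append_assoc]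
    simp

theorem pv_fold_row (l : List (String × Int × Int × Int × String)) (init : String) :
    l.foldl (fun out r => out ++ pvRow r) init = init ++ String.join (l.map pvRow) := by
  rw [← List.foldl_map, String.join]
  exact pvFoldlAppend _ _

-- ===== VERDICT (by name: the statement is the Claim_ definition above) =====
theorem compliance_mapper_spec : Claim_equal_compliance_mapper := by
  intro text _
  show compliance_mapper text = compliance_mapper_alt text
  unfold compliance_mapper compliance_mapper_alt
  simp only [pv_fold_lines_eq, pv_items_fold, PySem.Dict.values, List.map_map, List.nil_append,
             PySem.List.foldl_append_singleton_eq_map, pv_fold_row, Function.comp_def]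
  rw [pv_sum_tot]
  rw [List.map_congr_left (fun f hf =>
    pv_mk_eq (((PySem.Str.split? text "\n").getD []).filterMap pvParseB) f hf)]
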